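-- pv_equiv track=rewrite | github.com/ChoongGhee/baeckjoon | 백준/Platinum/2162. 선분 그룹/선분 그룹.py | solve
-- ===== SOURCE A (Python) =====
-- def find(parent, x):
--     if parent[x] != x:
--         parent[x] = find(parent, parent[x])
--     return parent[x]
--
-- def union(parent, size, a, b):
--     a = find(parent, a)
--     b = find(parent, b)
--     if a != b:
--         if size[a] < size[b]:
--             a, b = b, a
--         parent[b] = a
--         size[a] += size[b]
--
-- def ccw(x1, y1, x2, y2, x3, y3):
--     temp = (x2-x1)*(y3-y1) - (x3-x1)*(y2-y1)
--     if temp > 0: return 1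
--     elif temp < 0: return -1
--     return 0
--
-- def check_intersection(line1, line2):
--     x1, y1, x2, y2 = line1
--     x3, y3, x4, y4 = line2
--
--     abc = ccw(x1, y1, x2, y2, x3, y3)
--     abd = ccw(x1, y1, x2, y2, x4, y4)
--     cda = ccw(x3, y3, x4, y4, x1, y1)
--     cdb = ccw(x3, y3, x4, y4, x2, y2)
--
--     # 일직선 상에 있는 경우 추가 검사
--     if abc * abd == 0 and cda * cdb == 0:
--         # 각 선분의 x, y 범위가 겹치는지 확인
--         if min(x1, x2) <= max(x3, x4) and min(x3, x4) <= max(x1, x2) and \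
--            min(y1, y2) <= max(y3, y4) and min(y3, y4) <= max(y1, y2):
--             return True
--         return False
--
--     return abc * abd <= 0 and cda * cdb <= 0
--
-- def solve(N, lines):
--     parent = list(range(N))
--     size = [1] * N
--
--     # 모든 선분 쌍에 대해 교차 검사
--     for i in range(N):
--         for j in range(i+1, N):
--             if check_intersection(lines[i], lines[j]):
--                 union(parent, size, i, j)
--
--     # 그룹 수 계산
--     groups = set(find(parent, i) for i in range(N))
--     # 가장 큰 그룹의 크기 계산
--     max_size = max(size)
--
--     return len(groups), max_size
-- ===== SOURCE B (Python) =====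
-- def ccw(x1, y1, x2, y2, x3, y3):
--     temp = (x2-x1)*(y3-y1) - (x3-x1)*(y2-y1)
--     if temp > 0: return 1
--     elif temp < 0: return -1
--     return 0
--
-- def check_intersection(line1, line2):
--     x1, y1, x2, y2 = line1
--     x3, y3, x4, y4 = line2
--     abc = ccw(x1, y1, x2, y2, x3, y3)
--     abd = ccw(x1, y1, x2, y2, x4, y4)
--     cda = ccw(x3, y3, x4, y4, x1, y1)
--     cdb = ccw(x3, y3, x4, y4, x2, y2)
--     if abc * abd == 0 and cda * cdb == 0:
--         return (min(x1, x2) <= max(x3, x4) and min(x3, x4) <= max(x1, x2) and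
--                 min(y1, y2) <= max(y3, y4) and min(y3, y4) <= max(y1, y2))
--     return abc * abd <= 0 and cda * cdb <= 0
--
-- def solve(N, lines):
--     # merge-by-relabelling on a flat label array instead of union-find
--     labels = list(range(N))
--     for i in range(N):
--         for j in range(i + 1, N):
--             if labels[i] != labels[j] and check_intersection(lines[i], lines[j]):
--                 li, lj = labels[i], labels[j]
--                 labels = [li if v == lj else v for v in labels]
--     return len(set(labels)), max(labels.count(v) for v in labels)
-- ===== Notes on version B (the rewrite author's own statement) =====
-- stated objective: alternative
-- what changed: Union-find (parent array with path compression and union by size, plus a size array) is replaced by merge-by-relabelling on a flat label list: intersecting pairs with different labels trigger a full relabel of one class, groups = number of distinct labels, largest = max count of a label; the equal-label short-circuit also skips the geometry test inside already-joined groups.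
import Mathlib
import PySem

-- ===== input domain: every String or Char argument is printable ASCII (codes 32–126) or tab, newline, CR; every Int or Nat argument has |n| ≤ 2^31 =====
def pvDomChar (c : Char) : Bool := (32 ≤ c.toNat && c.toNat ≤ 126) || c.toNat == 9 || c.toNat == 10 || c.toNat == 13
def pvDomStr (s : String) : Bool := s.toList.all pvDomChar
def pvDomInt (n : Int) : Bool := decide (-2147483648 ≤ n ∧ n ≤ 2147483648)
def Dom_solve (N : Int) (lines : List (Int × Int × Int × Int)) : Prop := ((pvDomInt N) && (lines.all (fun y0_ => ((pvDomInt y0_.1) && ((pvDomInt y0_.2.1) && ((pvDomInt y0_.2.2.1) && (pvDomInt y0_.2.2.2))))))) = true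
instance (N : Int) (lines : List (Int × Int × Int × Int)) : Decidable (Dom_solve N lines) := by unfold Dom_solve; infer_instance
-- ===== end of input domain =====

-- B replaces A's union-find (parent + size arrays, path compression, union by size) by
-- merge-by-relabelling on one flat label list; objective: alternative (same asymptotic cost).

-- ===== PORT A =====
def pvCcw (x1 y1 x2 y2 x3 y3 : Int) : Int :=
  let temp := (x2 - x1) * (y3 - y1) - (x3 - x1) * (y2 - y1)
  if temp > 0 then 1 else if temp < 0 then -1 else 0

def pvCheck (line1 line2 : Int × Int × Int × Int) : Bool :=
  let (x1, y1, x2, y2) := line1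
  let (x3, y3, x4, y4) := line2
  let abc := pvCcw x1 y1 x2 y2 x3 y3
  let abd := pvCcw x1 y1 x2 y2 x4 y4
  let cda := pvCcw x3 y3 x4 y4 x1 y1
  let cdb := pvCcw x3 y3 x4 y4 x2 y2
  if abc * abd = 0 ∧ cda * cdb = 0 then
    decide (min x1 x2 ≤ max x3 x4 ∧ min x3 x4 ≤ max x1 x2 ∧
            min y1 y2 ≤ max y3 y4 ∧ min y3 y4 ≤ max y1 y2)
  else
    decide (abc * abd ≤ 0 ∧ cda * cdb ≤ 0)

-- Python's recursive find(parent, x) with path compression; fuel = len(parent) only makes the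
-- recursion structural — it is never exhausted on the forest-shaped parent lists solve builds.
def pvFind : Nat → List Int → Int → List Int × Int
  | 0, parent, x => (parent, x)
  | fuel + 1, parent, x =>
    if PySem.List.pyGetD parent x 0 ≠ x then
      let pr := pvFind fuel parent (PySem.List.pyGetD parent x 0)
      let parent2 := PySem.List.pySetD pr.1 x pr.2
      (parent2, PySem.List.pyGetD parent2 x 0)
    else (parent, PySem.List.pyGetD parent x 0)

def pvUnion (parent size : List Int) (a b : Int) : List Int × List Int :=
  let pa := pvFind parent.length parent a
  let pb := pvFind pa.1.length pa.1 b
  if pa.2 ≠ pb.2 then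
    let ab := if PySem.List.pyGetD size pa.2 0 < PySem.List.pyGetD size pb.2 0
              then (pb.2, pa.2) else (pa.2, pb.2)
    (PySem.List.pySetD pb.1 ab.2 ab.1,
     PySem.List.pySetD size ab.1 (PySem.List.pyGetD size ab.1 0 + PySem.List.pyGetD size ab.2 0))
  else (pb.1, size)

def pvLine0 : Int × Int × Int × Int := (0, 0, 0, 0)

def solve (N : Int) (lines : List (Int × Int × Int × Int)) : Int × Int :=
  let st := (PySem.List.pyRange 0 N 1).foldl (fun st i =>
      (PySem.List.pyRange (i + 1) N 1).foldl (fun st j =>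
          if pvCheck (PySem.List.pyGetD lines i pvLine0) (PySem.List.pyGetD lines j pvLine0)
          then pvUnion st.1 st.2 i j else st) st)
      (PySem.List.pyRange 0 N 1, List.replicate N.toNat (1 : Int))
  let groups := ((PySem.List.pyRange 0 N 1).foldl (fun acc i =>
      let pr := pvFind acc.1.length acc.1 i
      (pr.1, PySem.Set.add acc.2 pr.2)) (st.1, (PySem.Set.empty : PySem.Set Int))).2
  (PySem.Set.len groups, (PySem.List.max? st.2 (fun v => v)).getD 0)

-- ===== PORT B =====
def solve_alt (N : Int) (lines : List (Int × Int × Int × Int)) : Int × Int :=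
  let labels := (PySem.List.pyRange 0 N 1).foldl (fun lb i =>
      (PySem.List.pyRange (i + 1) N 1).foldl (fun lb j =>
          if PySem.List.pyGetD lb i 0 ≠ PySem.List.pyGetD lb j 0 ∧
             pvCheck (PySem.List.pyGetD lines i pvLine0) (PySem.List.pyGetD lines j pvLine0) = true
          then lb.map (fun v => if v = PySem.List.pyGetD lb j 0 then PySem.List.pyGetD lb i 0 else v)
          else lb) lb)
      (PySem.List.pyRange 0 N 1)
  (PySem.Set.len (PySem.Set.ofList labels),
   (PySem.List.max? (labels.map (fun v => (PySem.List.count labels v : Int))) (fun v => v)).getD 0)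

-- ===== PRECONDITION & SPEC =====
-- Pre_ excludes exactly the inputs on which Python A raises: N ≤ 0 (max(size) of an empty
-- list, ValueError) and N > len(lines) with N ≥ 2 (lines[i], IndexError; for N = 1 the pair
-- loop is empty and lines is never read).
def Pre_solve (N : Int) (lines : List (Int × Int × Int × Int)) : Prop :=
  1 ≤ N ∧ (N ≤ (lines.length : Int) ∨ N = 1)
instance (N : Int) (lines : List (Int × Int × Int × Int)) : Decidable (Pre_solve N lines) := by
  unfold Pre_solve; infer_instance

def pvWitness_solve : Int × (List (Int × Int × Int × Int)) := (2, [(0, 0, 1, 1), (0, 1, 1, 0)])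

def Spec_solve (N : Int) (lines : List (Int × Int × Int × Int)) (out : Int × Int) : Prop := out = solve_alt N lines
instance (N : Int) (lines : List (Int × Int × Int × Int)) (out : Int × Int) : Decidable (Spec_solve N lines out) := by unfold Spec_solve; infer_instance

-- ===== CLAIM (what is proved, stated in full; the proofs are below) =====
def Claim_equal_solve : Prop := ∀ (N : Int) (lines : List (Int × Int × Int × Int)), Dom_solve N lines → Pre_solve N lines → Spec_solve N lines (solve N lines)

-- ===== LEMMAS AND PROOFS =====

def pvG (p : List Int) (x : Int) : Int := PySem.List.pyGetD p x 0

lemma pvG_set_self {p : List Int} {x : Int} (v : Int) (hx0 : 0 ≤ x) (hx : x < (p.length : Int)) :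
    pvG (PySem.List.pySetD p x v) x = v := by
  rw [pvG, PySem.List.pySetD_of_nonneg _ _ hx0,
      PySem.List.pyGetD_eq_getElem _ _ hx0 (by simp; omega)]
  exact List.getElem_set_self _

lemma pvG_set_ne {p : List Int} {x : Int} (v : Int) {y : Int} (hx0 : 0 ≤ x) (hy0 : 0 ≤ y)
    (hne : y ≠ x) : pvG (PySem.List.pySetD p x v) y = pvG p y := by
  rw [pvG, pvG, PySem.List.pySetD_of_nonneg _ _ hx0]
  by_cases hy : y < (p.length : Int)
  · rw [PySem.List.pyGetD_eq_getElem _ _ hy0 (by simpa using hy),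
        PySem.List.pyGetD_eq_getElem _ _ hy0 hy]
    exact List.getElem_set_ne (fun h => hne (by omega)) _
  · rw [PySem.List.pyGetD_of_none, PySem.List.pyGetD_of_none] <;>
      · rw [PySem.List.pyGet?_eq_none_iff]
        simp [PySem.Raise.InRange]; omega

def pvIter (p : List Int) : Nat → Int → Int
  | 0, x => x
  | k + 1, x => pvIter p k (pvG p x)

def pvRoot (p : List Int) : Nat → Int → Int
  | 0, x => x
  | f + 1, x => if pvG p x = x then x else pvRoot p f (pvG p x)

def pvRho (p : List Int) (x : Int) : Int := pvRoot p p.length x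

def pvGood (n : Nat) (p : List Int) : Prop :=
  p.length = n ∧
  (∀ x : Int, 0 ≤ x → x < (n : Int) → 0 ≤ pvG p x ∧ pvG p x < (n : Int)) ∧
  (∀ x : Int, 0 ≤ x → x < (n : Int) → ∃ k, pvG p (pvIter p k x) = pvIter p k x)

lemma pvIter_succ_right (p : List Int) (k : Nat) (x : Int) :
    pvIter p (k + 1) x = pvG p (pvIter p k x) := by
  induction k generalizing x with
  | zero => rfl
  | succ k ih => rw [pvIter, ih, pvIter]

lemma pvIter_add (p : List Int) (a b : Nat) (x : Int) :
    pvIter p (a + b) x = pvIter p b (pvIter p a x) := by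
  induction b with
  | zero => rfl
  | succ b ih =>
    have h : a + (b + 1) = (a + b) + 1 := by omega
    rw [h, pvIter_succ_right, ih, ← pvIter_succ_right]

lemma pvIter_mem {n : Nat} {p : List Int} (hg : pvGood n p) {x : Int}
    (hx0 : 0 ≤ x) (hx : x < (n : Int)) (k : Nat) :
    0 ≤ pvIter p k x ∧ pvIter p k x < (n : Int) := by
  induction k generalizing x with
  | zero => exact ⟨hx0, hx⟩
  | succ k ih =>
    rw [pvIter]
    obtain ⟨h1, h2⟩ := hg.2.1 x hx0 hx
    exact ih h1 h2

lemma pvRoot_spec {p : List Int} {x : Int} {d : Nat}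
    (hd : pvG p (pvIter p d x) = pvIter p d x)
    (hmin : ∀ m < d, pvG p (pvIter p m x) ≠ pvIter p m x) :
    ∀ f, d ≤ f → pvRoot p f x = pvIter p d x := by
  induction d generalizing x with
  | zero =>
    intro f _
    simp only [pvIter] at hd
    cases f with
    | zero => rfl
    | succ f => simp [pvRoot, if_pos hd, pvIter]
  | succ d ih =>
    intro f hf
    have hnf : pvG p x ≠ x := by
      have := hmin 0 (by omega); simpa [pvIter] using this
    cases f with
    | zero => omega
    | succ f =>
      rw [pvRoot, if_neg hnf]
      have hd' : pvG p (pvIter p d (pvG p x)) = pvIter p d (pvG p x) := by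
        simpa [pvIter] using hd
      have hmin' : ∀ m < d, pvG p (pvIter p m (pvG p x)) ≠ pvIter p m (pvG p x) := by
        intro m hm
        have := hmin (m + 1) (by omega)
        simpa [pvIter] using this
      rw [ih hd' hmin' f (by omega)]
      rfl

lemma pvDep_lt {n : Nat} {p : List Int} (hg : pvGood n p) {x : Int}
    (hx0 : 0 ≤ x) (hx : x < (n : Int)) (h : ∃ k, pvG p (pvIter p k x) = pvIter p k x) :
    Nat.find h < n := by
  set d := Nat.find h with hdd
  have hd : pvG p (pvIter p d x) = pvIter p d x := Nat.find_spec h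
  have hmin : ∀ m < d, pvG p (pvIter p m x) ≠ pvIter p m x := fun m hm => Nat.find_min h hm
  have key : ∀ k1 k2, k1 < k2 → k2 ≤ d → pvIter p k1 x ≠ pvIter p k2 x := by
    intro k1 k2 hlt hle heq
    have hiter : pvIter p (k1 + (d - k2)) x = pvIter p d x := by
      rw [pvIter_add, heq, ← pvIter_add]
      congr 1
      omega
    exact hmin (k1 + (d - k2)) (by omega) (by rw [hiter]; exact hd)
  have hinj : Set.InjOn (fun k => pvIter p k x) ↑(Finset.range (d + 1)) := by
    intro k1 h1 k2 h2 heq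
    simp only [Finset.coe_range, Set.mem_Iio] at h1 h2
    by_contra hne
    rcases Nat.lt_or_ge k1 k2 with hlt | hge
    · exact key k1 k2 hlt (by omega) heq
    · exact key k2 k1 (by omega) (by omega) heq.symm
  have hcard : ((Finset.range (d + 1)).image (fun k => pvIter p k x)).card = d + 1 := by
    rw [Finset.card_image_of_injOn hinj, Finset.card_range]
  have hsub : (Finset.range (d + 1)).image (fun k => pvIter p k x) ⊆
      Finset.Ico (0 : Int) (n : Int) := by
    intro y hy
    simp only [Finset.mem_image, Finset.mem_range] at hy
    obtain ⟨k, _, rfl⟩ := hy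
    have := pvIter_mem hg hx0 hx k
    simp only [Finset.mem_Ico]
    exact this
  have hle := Finset.card_le_card hsub
  rw [hcard, Int.card_Ico] at hle
  omega

lemma pvRoot_fix {p : List Int} {x : Int} (hfix : pvG p x = x) :
    ∀ f, pvRoot p f x = x := by
  intro f
  cases f with
  | zero => rfl
  | succ f => simp [pvRoot, hfix]

lemma pvRho_fix {p : List Int} {x : Int} (hfix : pvG p x = x) : pvRho p x = x :=
  pvRoot_fix hfix _

lemma pvRho_spec {n : Nat} {p : List Int} (hg : pvGood n p) {x : Int}
    (hx0 : 0 ≤ x) (hx : x < (n : Int)) :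
    pvG p (pvRho p x) = pvRho p x ∧ 0 ≤ pvRho p x ∧ pvRho p x < (n : Int) := by
  have h := hg.2.2 x hx0 hx
  have hd : pvG p (pvIter p (Nat.find h) x) = pvIter p (Nat.find h) x := Nat.find_spec h
  have hlt : Nat.find h < n := pvDep_lt hg hx0 hx h
  have hlen : p.length = n := hg.1
  have hroot : pvRho p x = pvIter p (Nat.find h) x := by
    rw [pvRho]
    exact pvRoot_spec hd (fun m hm => Nat.find_min h hm) _ (by omega)
  rw [hroot]
  exact ⟨hd, pvIter_mem hg hx0 hx _⟩

lemma pvRho_step {n : Nat} {p : List Int} (hg : pvGood n p) {x : Int}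
    (hx0 : 0 ≤ x) (hx : x < (n : Int)) (hnf : pvG p x ≠ x) :
    pvRho p x = pvRho p (pvG p x) := by
  have h := hg.2.2 x hx0 hx
  set d := Nat.find h with hdd
  have hd : pvG p (pvIter p d x) = pvIter p d x := Nat.find_spec h
  have hmin : ∀ m < d, pvG p (pvIter p m x) ≠ pvIter p m x := fun m hm => Nat.find_min h hm
  have hdpos : 0 < d := by
    rcases Nat.eq_zero_or_pos d with h0 | h0
    · exact absurd (by simpa [pvIter, h0] using hd) hnf
    · exact h0
  have hlt : d < n := pvDep_lt hg hx0 hx h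
  have hlen : p.length = n := hg.1
  have hstep : pvIter p d x = pvIter p (d - 1) (pvG p x) := by
    conv_lhs => rw [show d = (d - 1) + 1 by omega]
    rfl
  have h1 : pvRho p x = pvIter p d x := by
    rw [pvRho]; exact pvRoot_spec hd hmin _ (by omega)
  have hd' : pvG p (pvIter p (d - 1) (pvG p x)) = pvIter p (d - 1) (pvG p x) := by
    rw [← hstep]; exact hd
  have hmin' : ∀ m < d - 1, pvG p (pvIter p m (pvG p x)) ≠ pvIter p m (pvG p x) := by
    intro m hm
    have he : pvIter p m (pvG p x) = pvIter p (m + 1) x := rfl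
    rw [he]
    exact hmin (m + 1) (by omega)
  have h2 : pvRho p (pvG p x) = pvIter p (d - 1) (pvG p x) := by
    rw [pvRho]; exact pvRoot_spec hd' hmin' _ (by omega)
  rw [h1, h2, hstep]

lemma pvSet_rho {n : Nat} {p : List Int} (hg : pvGood n p) {t r : Int}
    (ht0 : 0 ≤ t) (ht : t < (n : Int)) (hr0 : 0 ≤ r) (hr : r < (n : Int))
    (hfix : pvG p r = r) (H : r = pvRho p t ∨ pvG p t = t) :
    pvGood n (PySem.List.pySetD p t r) ∧
    ∀ y : Int, 0 ≤ y → y < (n : Int) →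
      pvRho (PySem.List.pySetD p t r) y = if pvRho p y = pvRho p t then r else pvRho p y := by
  set p' := PySem.List.pySetD p t r with hp'
  have hlen : p.length = n := hg.1
  have hlen' : p'.length = n := by rw [hp', PySem.List.length_pySetD, hlen]
  have hpt : pvG p' t = r := pvG_set_self r ht0 (by omega)
  have hne : ∀ y : Int, 0 ≤ y → y ≠ t → pvG p' y = pvG p y :=
    fun y hy0 hyt => pvG_set_ne r ht0 hy0 hyt
  have hrfix' : pvG p' r = r := by
    by_cases hrt : r = t
    · rw [hrt] at hpt ⊢; rw [hpt, ← hrt]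
    · rw [hne r hr0 hrt]; exact hfix
  have treach : ∃ k', pvG p' (pvIter p' k' t) = pvIter p' k' t := by
    refine ⟨1, ?_⟩
    have h1 : pvIter p' 1 t = pvG p' t := rfl
    rw [h1, hpt]
    exact hrfix'
  have hfixreach : ∀ y : Int, 0 ≤ y → y < (n : Int) → pvG p y = y →
      ∃ k', pvG p' (pvIter p' k' y) = pvIter p' k' y := by
    intro y hy0 hyn hfy
    by_cases hyt : y = t
    · rw [hyt]; exact treach
    · exact ⟨0, by simpa [pvIter] using (hne y hy0 hyt).trans hfy⟩
  have reach' : ∀ (k : Nat) (y : Int), 0 ≤ y → y < (n : Int) →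
      pvG p (pvIter p k y) = pvIter p k y →
      ∃ k', pvG p' (pvIter p' k' y) = pvIter p' k' y := by
    intro k
    induction k with
    | zero =>
      intro y hy0 hyn hfixy
      simp only [pvIter] at hfixy
      exact hfixreach y hy0 hyn hfixy
    | succ k ih =>
      intro y hy0 hyn hfixy
      by_cases hfy : pvG p y = y
      · exact hfixreach y hy0 hyn hfy
      · by_cases hyt : y = t
        · rw [hyt]; exact treach
        · obtain ⟨hz0, hzn⟩ := hg.2.1 y hy0 hyn
          have hstep : pvIter p (k + 1) y = pvIter p k (pvG p y) := rfl
          rw [hstep] at hfixy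
          obtain ⟨k', hk'⟩ := ih (pvG p y) hz0 hzn hfixy
          refine ⟨k' + 1, ?_⟩
          have h1 : pvIter p' (k' + 1) y = pvIter p' k' (pvG p' y) := rfl
          rw [h1, hne y hy0 hyt]
          exact hk'
  have hg' : pvGood n p' := by
    refine ⟨hlen', ?_, ?_⟩
    · intro x hx0 hxn
      by_cases hxt : x = t
      · rw [hxt, hpt]; exact ⟨hr0, hr⟩
      · rw [hne x hx0 hxt]; exact hg.2.1 x hx0 hxn
    · intro x hx0 hxn
      obtain ⟨k, hk⟩ := hg.2.2 x hx0 hxn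
      exact reach' k x hx0 hxn hk
  have hrt : pvRho p' t = r := by
    by_cases hrteq : r = t
    · rw [← hrteq] at hpt ⊢
      rw [pvRho_fix hpt]
    · have hntf : pvG p' t ≠ t := by rw [hpt]; exact hrteq
      rw [pvRho_step hg' ht0 ht hntf, hpt, pvRho_fix hrfix']
  have c_fix : ∀ y : Int, 0 ≤ y → y < (n : Int) → pvG p y = y →
      pvRho p' y = if pvRho p y = pvRho p t then r else pvRho p y := by
    intro y hy0 hyn hfy
    have hrhy : pvRho p y = y := pvRho_fix hfy
    by_cases hyt : y = t
    · rw [hyt] at *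
      rw [if_pos rfl]
      exact hrt
    · have hfy' : pvG p' y = y := (hne y hy0 hyt).trans hfy
      rw [pvRho_fix hfy', hrhy]
      by_cases hc : y = pvRho p t
      · rw [if_pos hc]
        rcases H with H1 | H2
        · rw [H1, ← hc]
        · exact absurd (hc.trans (pvRho_fix H2)) hyt
      · rw [if_neg hc]
  have main : ∀ (k : Nat) (y : Int), 0 ≤ y → y < (n : Int) →
      pvG p (pvIter p k y) = pvIter p k y →
      pvRho p' y = if pvRho p y = pvRho p t then r else pvRho p y := by
    intro k
    induction k with
    | zero =>
      intro y hy0 hyn hfixy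
      simp only [pvIter] at hfixy
      exact c_fix y hy0 hyn hfixy
    | succ k ih =>
      intro y hy0 hyn hfixy
      by_cases hfy : pvG p y = y
      · exact c_fix y hy0 hyn hfy
      · by_cases hyt : y = t
        · rw [hyt, if_pos rfl]; exact hrt
        · obtain ⟨hz0, hzn⟩ := hg.2.1 y hy0 hyn
          have hstep : pvIter p (k + 1) y = pvIter p k (pvG p y) := rfl
          rw [hstep] at hfixy
          have ihz := ih (pvG p y) hz0 hzn hfixy
          have hry : pvRho p y = pvRho p (pvG p y) := pvRho_step hg hy0 hyn hfy
          have hfy' : pvG p' y ≠ y := by rw [hne y hy0 hyt]; exact hfy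
          rw [pvRho_step hg' hy0 hyn hfy', hne y hy0 hyt, ihz, ← hry]
  refine ⟨hg', fun y hy0 hyn => ?_⟩
  obtain ⟨k, hk⟩ := hg.2.2 y hy0 hyn
  exact main k y hy0 hyn hk

lemma pvG_def (p : List Int) (x : Int) : PySem.List.pyGetD p x 0 = pvG p x := rfl

lemma pvFind_spec {n : Nat} : ∀ (f : Nat) (p : List Int) (x : Int), pvGood n p →
    0 ≤ x → x < (n : Int) →
    ∀ (h : ∃ k, pvG p (pvIter p k x) = pvIter p k x), Nat.find h ≤ f →
    (pvFind f p x).2 = pvRho p x ∧ pvGood n (pvFind f p x).1 ∧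
    (∀ y : Int, 0 ≤ y → y < (n : Int) → pvRho (pvFind f p x).1 y = pvRho p y) := by
  intro f
  induction f with
  | zero =>
    intro p x hg hx0 hxn h hf
    have h0 : Nat.find h = 0 := by omega
    have hfix : pvG p x = x := by
      have := Nat.find_spec h
      rw [h0] at this
      simpa [pvIter] using this
    simp only [pvFind]
    exact ⟨(pvRho_fix hfix).symm, hg, by simp⟩
  | succ f ih =>
    intro p x hg hx0 hxn h hf
    by_cases hfy : pvG p x = x
    · rw [show pvFind (f + 1) p x = (p, PySem.List.pyGetD p x 0) from by simp [pvFind, pvG_def, hfy]]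
      exact ⟨by simp [pvG_def, hfy, pvRho_fix hfy], hg, fun y _ _ => rfl⟩
    · have hcond : PySem.List.pyGetD p x 0 ≠ x := hfy
      obtain ⟨hz0, hzn⟩ := hg.2.1 x hx0 hxn
      have hd := Nat.find_spec h
      have hdpos : 0 < Nat.find h := by
        rcases Nat.eq_zero_or_pos (Nat.find h) with h0 | h0
        · exact absurd (by simpa [pvIter, h0] using hd) hfy
        · exact h0
      have h' : ∃ k, pvG p (pvIter p k (pvG p x)) = pvIter p k (pvG p x) := by
        refine ⟨Nat.find h - 1, ?_⟩
        have he : pvIter p (Nat.find h - 1) (pvG p x) = pvIter p (Nat.find h) x := by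
          conv_rhs => rw [show Nat.find h = (Nat.find h - 1) + 1 by omega]
          rfl
        rw [he]
        exact hd
      have hfle : Nat.find h' ≤ f := by
        have h2 : Nat.find h' ≤ Nat.find h - 1 := by
          apply Nat.find_min' h'
          have he : pvIter p (Nat.find h - 1) (pvG p x) = pvIter p (Nat.find h) x := by
            conv_rhs => rw [show Nat.find h = (Nat.find h - 1) + 1 by omega]
            rfl
          rw [he]
          exact hd
        omega
      obtain ⟨hv, hg1, hpres⟩ := ih p (pvG p x) hg hz0 hzn h' hfle
      set pr := pvFind f p (pvG p x) with hpr
      have hrx : pr.2 = pvRho p x := by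
        rw [hv, ← pvRho_step hg hx0 hxn hfy]
      have hr1 : pr.2 = pvRho pr.1 x := by rw [hrx, ← hpres x hx0 hxn]
      obtain ⟨hfix1, hr0', hrn'⟩ := pvRho_spec hg1 hx0 hxn
      have hsr := pvSet_rho hg1 hx0 hxn (hr1 ▸ hr0') (hr1 ▸ hrn') (by rw [hr1]; exact hfix1)
        (Or.inl hr1)
      have hlen1 : pr.1.length = n := hg1.1
      simp only [pvFind, pvG_def, if_pos hfy, ← hpr]
      refine ⟨?_, hsr.1, ?_⟩
      · rw [pvG_set_self pr.2 hx0 (by omega), hrx]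
      · intro y hy0 hyn
        rw [hsr.2 y hy0 hyn]
        by_cases hc : pvRho pr.1 y = pvRho pr.1 x
        · rw [if_pos hc, hr1, ← hc]
          exact hpres y hy0 hyn
        · rw [if_neg hc]
          exact hpres y hy0 hyn

lemma pvCount_relabel_target {lb : List Int} {li lj : Int} (hne : li ≠ lj) :
    List.count li (lb.map (fun v => if v = lj then li else v)) =
      List.count li lb + List.count lj lb := by
  induction lb with
  | nil => simp
  | cons v tl ih =>
    simp only [List.map_cons, List.count_cons, ih]
    split_ifs <;> simp_all <;> omega

lemma pvCount_relabel_other {lb : List Int} {li lj w : Int} (hwi : w ≠ li) (hwj : w ≠ lj) :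
    List.count w (lb.map (fun v => if v = lj then li else v)) = List.count w lb := by
  induction lb with
  | nil => simp
  | cons v tl ih =>
    simp only [List.map_cons, List.count_cons, ih]
    split_ifs <;> simp_all

lemma pvG_map (f : Int → Int) {lb : List Int} {x : Int} (hx0 : 0 ≤ x)
    (hx : x < (lb.length : Int)) : pvG (lb.map f) x = f (pvG lb x) := by
  rw [pvG, pvG, PySem.List.pyGetD_eq_getElem _ _ hx0 (by simpa using hx),
      PySem.List.pyGetD_eq_getElem _ _ hx0 hx]
  simp

def pvInv (n : Nat) (p s lb : List Int) : Prop :=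
  pvGood n p ∧ s.length = n ∧ lb.length = n ∧
  (∀ x y : Int, 0 ≤ x → x < (n : Int) → 0 ≤ y → y < (n : Int) →
     (pvG lb x = pvG lb y ↔ pvRho p x = pvRho p y)) ∧
  (∀ x : Int, 0 ≤ x → x < (n : Int) →
     pvG s (pvRho p x) = (List.count (pvG lb x) lb : Int)) ∧
  (∀ x : Int, 0 ≤ x → x < (n : Int) → pvG s x ≤ pvG s (pvRho p x))

lemma pvMerge {n : Nat} {p s lb : List Int}
    (hg : pvGood n p) (hs : s.length = n) (hlb : lb.length = n)
    (heq : ∀ x y : Int, 0 ≤ x → x < (n : Int) → 0 ≤ y → y < (n : Int) →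
      (pvG lb x = pvG lb y ↔ pvRho p x = pvRho p y))
    (hsz : ∀ x : Int, 0 ≤ x → x < (n : Int) →
      pvG s (pvRho p x) = (List.count (pvG lb x) lb : Int))
    (hstale : ∀ x : Int, 0 ≤ x → x < (n : Int) → pvG s x ≤ pvG s (pvRho p x))
    {i j : Int} (hi0 : 0 ≤ i) (hi : i < (n : Int)) (hj0 : 0 ≤ j) (hj : j < (n : Int))
    (hroots : ¬ pvRho p i = pvRho p j) (hlabne : ¬ pvG lb i = pvG lb j)
    {p2 : List Int} (hgb : pvGood n p2)
    (hpres2 : ∀ y : Int, 0 ≤ y → y < (n : Int) → pvRho p2 y = pvRho p y)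
    {a2 b2 : Int}
    (habs : (a2 = pvRho p i ∧ b2 = pvRho p j) ∨ (a2 = pvRho p j ∧ b2 = pvRho p i)) :
    pvInv n (PySem.List.pySetD p2 b2 a2)
      (PySem.List.pySetD s a2 (PySem.List.pyGetD s a2 0 + PySem.List.pyGetD s b2 0))
      (lb.map (fun v => if v = pvG lb j then pvG lb i else v)) := by
  set li := pvG lb i with hli
  set lj := pvG lb j with hlj
  set a1 := pvRho p i with ha1d
  set b1 := pvRho p j with hb1d
  obtain ⟨hfixa1, ha10, ha1n⟩ := pvRho_spec hg hi0 hi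
  obtain ⟨hfixb1, hb10, hb1n⟩ := pvRho_spec hg hj0 hj
  have hrhoa1 : pvRho p a1 = a1 := pvRho_fix hfixa1
  have hrhob1 : pvRho p b1 = b1 := pvRho_fix hfixb1
  have ha20 : 0 ≤ a2 := by rcases habs with ⟨h1, _⟩ | ⟨h1, _⟩ <;> rw [h1] <;> assumption
  have ha2n : a2 < (n : Int) := by rcases habs with ⟨h1, _⟩ | ⟨h1, _⟩ <;> rw [h1] <;> assumption
  have hb20 : 0 ≤ b2 := by rcases habs with ⟨_, h1⟩ | ⟨_, h1⟩ <;> rw [h1] <;> assumption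
  have hb2n : b2 < (n : Int) := by rcases habs with ⟨_, h1⟩ | ⟨_, h1⟩ <;> rw [h1] <;> assumption
  have hrhoa2 : pvRho p a2 = a2 := by
    rcases habs with ⟨h1, _⟩ | ⟨h1, _⟩ <;> rw [h1] <;> assumption
  have hrhob2 : pvRho p b2 = b2 := by
    rcases habs with ⟨_, h1⟩ | ⟨_, h1⟩ <;> rw [h1] <;> assumption
  have hne12 : a2 ≠ b2 := by
    rcases habs with ⟨h1, h2⟩ | ⟨h1, h2⟩ <;> rw [h1, h2] <;>
      [exact fun h => hroots h; exact fun h => hroots h.symm]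
  have hfixb2 : pvG p2 b2 = b2 := by
    have := (pvRho_spec hgb hb20 hb2n).1
    rwa [hpres2 b2 hb20 hb2n, hrhob2] at this
  have hsr := pvSet_rho hgb hb20 hb2n ha20 ha2n
    (by have := (pvRho_spec hgb ha20 ha2n).1; rwa [hpres2 a2 ha20 ha2n, hrhoa2] at this)
    (Or.inr hfixb2)
  have hg3 := hsr.1
  have hrho3 : ∀ y : Int, 0 ≤ y → y < (n : Int) →
      pvRho (PySem.List.pySetD p2 b2 a2) y = if pvRho p y = b2 then a2 else pvRho p y := by
    intro y hy0 hyn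
    rw [hsr.2 y hy0 hyn, hpres2 y hy0 hyn, hpres2 b2 hb20 hb2n, hrhob2]
  -- label-side facts
  have hlin : li ≠ lj := hlabne
  have hM : ∀ x : Int, 0 ≤ x → x < (n : Int) →
      ((pvG lb x = li ∨ pvG lb x = lj) ↔ (pvRho p x = a1 ∨ pvRho p x = b1)) := by
    intro x hx0 hxn
    rw [hli, hlj, ha1d, hb1d]
    constructor
    · rintro (h | h)
      · exact Or.inl ((heq x i hx0 hxn hi0 hi).mp h)
      · exact Or.inr ((heq x j hx0 hxn hj0 hj).mp h)
    · rintro (h | h)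
      · exact Or.inl ((heq x i hx0 hxn hi0 hi).mpr h)
      · exact Or.inr ((heq x j hx0 hxn hj0 hj).mpr h)
  have hab12 : ∀ r : Int, (r = a1 ∨ r = b1) ↔ (r = a2 ∨ r = b2) := by
    intro r
    rcases habs with ⟨h1, h2⟩ | ⟨h1, h2⟩ <;> rw [h1, h2] <;> tauto
  have hrho3M : ∀ x : Int, 0 ≤ x → x < (n : Int) → (pvRho p x = a1 ∨ pvRho p x = b1) →
      pvRho (PySem.List.pySetD p2 b2 a2) x = a2 := by
    intro x hx0 hxn hMx
    rw [hrho3 x hx0 hxn]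
    rcases (hab12 _).mp hMx with h | h
    · rw [if_neg (by rw [h]; exact hne12), h]
    · rw [if_pos h]
  have hrho3N : ∀ x : Int, 0 ≤ x → x < (n : Int) → ¬ (pvRho p x = a1 ∨ pvRho p x = b1) →
      pvRho (PySem.List.pySetD p2 b2 a2) x = pvRho p x := by
    intro x hx0 hxn hMx
    rw [hrho3 x hx0 hxn, if_neg (fun h => hMx ((hab12 _).mpr (Or.inr h)))]
  have hpglb' : ∀ x : Int, 0 ≤ x → x < (n : Int) →
      pvG (lb.map (fun v => if v = lj then li else v)) x =
        if pvG lb x = lj then li else pvG lb x := by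
    intro x hx0 hxn
    exact pvG_map _ hx0 (by rw [hlb]; exact hxn)
  have hLM : ∀ x : Int, 0 ≤ x → x < (n : Int) → (pvG lb x = li ∨ pvG lb x = lj) →
      (if pvG lb x = lj then li else pvG lb x) = li := by
    intro x hx0 hxn hMx
    rcases hMx with h | h
    · rw [if_neg (by rw [h]; exact hlin), h]
    · rw [if_pos h]
  have hLN : ∀ x : Int, 0 ≤ x → x < (n : Int) → ¬ (pvG lb x = li ∨ pvG lb x = lj) →
      (if pvG lb x = lj then li else pvG lb x) = pvG lb x := by
    intro x hx0 hxn hMx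
    rw [if_neg (fun h => hMx (Or.inr h))]
  -- size values
  have hcnti : pvG s a1 = (List.count li lb : Int) := hsz i hi0 hi
  have hcntj : pvG s b1 = (List.count lj lb : Int) := hsz j hj0 hj
  have hsum : pvG s a2 + pvG s b2 = (List.count li lb : Int) + (List.count lj lb : Int) := by
    rcases habs with ⟨h1, h2⟩ | ⟨h1, h2⟩ <;> rw [h1, h2] <;> rw [hcnti, hcntj] <;> ring
  have hs3self : pvG (PySem.List.pySetD s a2 (PySem.List.pyGetD s a2 0 + PySem.List.pyGetD s b2 0)) a2
      = pvG s a2 + pvG s b2 := pvG_set_self _ ha20 (by rw [hs]; exact ha2n)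
  have hs3ne : ∀ y : Int, 0 ≤ y → y ≠ a2 →
      pvG (PySem.List.pySetD s a2 (PySem.List.pyGetD s a2 0 + PySem.List.pyGetD s b2 0)) y = pvG s y :=
    fun y hy0 hyne => pvG_set_ne _ ha20 hy0 hyne
  refine ⟨hg3, by rw [PySem.List.length_pySetD, hs], by rw [List.length_map, hlb], ?_, ?_, ?_⟩
  · -- label equivalence
    intro x y hx0 hxn hy0 hyn
    rw [hpglb' x hx0 hxn, hpglb' y hy0 hyn]
    by_cases hMx : pvG lb x = li ∨ pvG lb x = lj <;>
      by_cases hMy : pvG lb y = li ∨ pvG lb y = lj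
    · rw [hLM x hx0 hxn hMx, hLM y hy0 hyn hMy,
          hrho3M x hx0 hxn ((hM x hx0 hxn).mp hMx), hrho3M y hy0 hyn ((hM y hy0 hyn).mp hMy)]
      simp
    · rw [hLM x hx0 hxn hMx, hLN y hy0 hyn hMy, hrho3M x hx0 hxn ((hM x hx0 hxn).mp hMx),
          hrho3N y hy0 hyn (fun h => hMy ((hM y hy0 hyn).mpr h))]
      constructor
      · intro h; exact absurd (Or.inl h.symm) hMy
      · intro h
        exact absurd ((hab12 _).mpr (Or.inl h.symm)) (fun hh => hMy ((hM y hy0 hyn).mpr hh))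
    · rw [hLN x hx0 hxn hMx, hLM y hy0 hyn hMy, hrho3M y hy0 hyn ((hM y hy0 hyn).mp hMy),
          hrho3N x hx0 hxn (fun h => hMx ((hM x hx0 hxn).mpr h))]
      constructor
      · intro h; exact absurd (Or.inl h) hMx
      · intro h
        exact absurd ((hab12 _).mpr (Or.inl h)) (fun hh => hMx ((hM x hx0 hxn).mpr hh))
    · rw [hLN x hx0 hxn hMx, hLN y hy0 hyn hMy,
          hrho3N x hx0 hxn (fun h => hMx ((hM x hx0 hxn).mpr h)),
          hrho3N y hy0 hyn (fun h => hMy ((hM y hy0 hyn).mpr h))]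
      exact heq x y hx0 hxn hy0 hyn
  · -- sizes at roots
    intro x hx0 hxn
    rw [hpglb' x hx0 hxn]
    by_cases hMx : pvG lb x = li ∨ pvG lb x = lj
    · rw [hLM x hx0 hxn hMx, hrho3M x hx0 hxn ((hM x hx0 hxn).mp hMx), hs3self, hsum,
          pvCount_relabel_target hlin]
      push_cast
      ring
    · have hNx := fun h => hMx ((hM x hx0 hxn).mpr h)
      rw [hLN x hx0 hxn hMx, hrho3N x hx0 hxn hNx]
      obtain ⟨_, hr0, _⟩ := pvRho_spec hg hx0 hxn
      rw [hs3ne (pvRho p x) hr0 (fun h => hNx ((hab12 _).mpr (Or.inl h)))]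
      rw [hsz x hx0 hxn, pvCount_relabel_other (fun h => hMx (Or.inl h)) (fun h => hMx (Or.inr h))]
  · -- stale sizes
    intro x hx0 hxn
    by_cases hxa2 : x = a2
    · rw [hxa2, hrho3M a2 ha20 ha2n ((hab12 _).mpr (Or.inl hrhoa2))]
    · rw [hs3ne x hx0 hxa2]
      by_cases hMx : pvRho p x = a1 ∨ pvRho p x = b1
      · rw [hrho3M x hx0 hxn hMx, hs3self]
        have h1 := hstale x hx0 hxn
        have h2 : (0 : Int) ≤ (List.count li lb : Int) := by positivity
        have h3 : (0 : Int) ≤ (List.count lj lb : Int) := by positivity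
        have h4 : pvG s (pvRho p x) ≤ pvG s a2 + pvG s b2 := by
          rw [hsum]
          rcases hMx with h | h
          · rw [h, hcnti]; omega
          · rw [h, hcntj]; omega
        omega
      · have hNx := hMx
        rw [hrho3N x hx0 hxn hNx]
        obtain ⟨_, hr0, _⟩ := pvRho_spec hg hx0 hxn
        rw [hs3ne (pvRho p x) hr0 (fun h => hNx ((hab12 _).mpr (Or.inl h)))]
        exact hstale x hx0 hxn

lemma pvStep {n : Nat} {p s lb : List Int} (inv : pvInv n p s lb) {i j : Int}
    (hi0 : 0 ≤ i) (hi : i < (n : Int)) (hj0 : 0 ≤ j) (hj : j < (n : Int)) (c : Bool) :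
    pvInv n (if c then pvUnion p s i j else (p, s)).1 (if c then pvUnion p s i j else (p, s)).2
      (if pvG lb i ≠ pvG lb j ∧ c = true
       then lb.map (fun v => if v = pvG lb j then pvG lb i else v) else lb) := by
  obtain ⟨hg, hs, hlb, heq, hsz, hstale⟩ := inv
  cases c with
  | false =>
    simp only [Bool.false_eq_true, and_false, if_false, ite_false]
    exact ⟨hg, hs, hlb, heq, hsz, hstale⟩
  | true =>
    simp only [if_true, and_true, ne_eq]
    have hlen := hg.1
    have hhi := hg.2.2 i hi0 hi
    have hfa := pvFind_spec p.length p i hg hi0 hi hhi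
      (by have := pvDep_lt hg hi0 hi hhi; omega)
    set pa := pvFind p.length p i with hpa
    obtain ⟨hva, hga, hpresa⟩ := hfa
    have hlena := hga.1
    have hhj := hga.2.2 j hj0 hj
    have hfb := pvFind_spec pa.1.length pa.1 j hga hj0 hj hhj
      (by have := pvDep_lt hga hj0 hj hhj; omega)
    set pb := pvFind pa.1.length pa.1 j with hpb
    obtain ⟨hvb, hgb, hpresb⟩ := hfb
    have hlenb := hgb.1
    have ha1 : pa.2 = pvRho p i := hva
    have hb1 : pb.2 = pvRho p j := by rw [hvb, hpresa j hj0 hj]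
    have hpres2 : ∀ y : Int, 0 ≤ y → y < (n : Int) → pvRho pb.1 y = pvRho p y := fun y h0 h1 =>
      (hpresb y h0 h1).trans (hpresa y h0 h1)
    by_cases hroots : pvRho p i = pvRho p j
    · -- same group: A's union is a no-op, B skips
      have hlabeq : pvG lb i = pvG lb j := (heq i j hi0 hi hj0 hj).mpr hroots
      rw [if_neg (not_not_intro hlabeq)]
      rw [show pvUnion p s i j = (pb.1, s) from by
        simp only [pvUnion, ← hpa, ← hpb]
        rw [if_neg (by simp [ha1, hb1, hroots])]]
      refine ⟨hgb, hs, hlb, ?_, ?_, ?_⟩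
      · intro x y hx0 hx hy0 hy
        rw [hpres2 x hx0 hx, hpres2 y hy0 hy]
        exact heq x y hx0 hx hy0 hy
      · intro x hx0 hx
        rw [hpres2 x hx0 hx]
        exact hsz x hx0 hx
      · intro x hx0 hx
        rw [hpres2 x hx0 hx]
        exact hstale x hx0 hx
    · -- different groups: A merges via union, B relabels
      have hlabne : ¬ pvG lb i = pvG lb j := fun h => hroots ((heq i j hi0 hi hj0 hj).mp h)
      rw [if_pos hlabne]
      have hane : pa.2 ≠ pb.2 := by rw [ha1, hb1]; exact hroots
      rw [show pvUnion p s i j =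
          (PySem.List.pySetD pb.1
            (if PySem.List.pyGetD s pa.2 0 < PySem.List.pyGetD s pb.2 0 then (pb.2, pa.2) else (pa.2, pb.2)).2
            (if PySem.List.pyGetD s pa.2 0 < PySem.List.pyGetD s pb.2 0 then (pb.2, pa.2) else (pa.2, pb.2)).1,
           PySem.List.pySetD s
            (if PySem.List.pyGetD s pa.2 0 < PySem.List.pyGetD s pb.2 0 then (pb.2, pa.2) else (pa.2, pb.2)).1
            (PySem.List.pyGetD s (if PySem.List.pyGetD s pa.2 0 < PySem.List.pyGetD s pb.2 0 then (pb.2, pa.2) else (pa.2, pb.2)).1 0 +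
             PySem.List.pyGetD s (if PySem.List.pyGetD s pa.2 0 < PySem.List.pyGetD s pb.2 0 then (pb.2, pa.2) else (pa.2, pb.2)).2 0)) from by
        simp only [pvUnion, ← hpa, ← hpb]
        rw [if_pos hane]]
      have habs : ((if PySem.List.pyGetD s pa.2 0 < PySem.List.pyGetD s pb.2 0 then (pb.2, pa.2) else (pa.2, pb.2)).1 = pvRho p i ∧
                   (if PySem.List.pyGetD s pa.2 0 < PySem.List.pyGetD s pb.2 0 then (pb.2, pa.2) else (pa.2, pb.2)).2 = pvRho p j) ∨
                  ((if PySem.List.pyGetD s pa.2 0 < PySem.List.pyGetD s pb.2 0 then (pb.2, pa.2) else (pa.2, pb.2)).1 = pvRho p j ∧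
                   (if PySem.List.pyGetD s pa.2 0 < PySem.List.pyGetD s pb.2 0 then (pb.2, pa.2) else (pa.2, pb.2)).2 = pvRho p i) := by
        split_ifs with hcmp
        · exact Or.inr ⟨hb1, ha1⟩
        · exact Or.inl ⟨ha1, hb1⟩
      generalize (if PySem.List.pyGetD s pa.2 0 < PySem.List.pyGetD s pb.2 0 then (pb.2, pa.2) else (pa.2, pb.2)) = ab at habs ⊢
      obtain ⟨a2, b2⟩ := ab
      simp only at habs ⊢
      exact pvMerge hg hs hlb heq hsz hstale hi0 hi hj0 hj hroots hlabne hgb hpres2 habs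

lemma pvFoldl_rel {α β γ : Type} (R : α → β → Prop) (f : α → γ → α) (g : β → γ → β) :
    ∀ (l : List γ) (a : α) (b : β), R a b → (∀ a b c, c ∈ l → R a b → R (f a c) (g b c)) →
      R (l.foldl f a) (l.foldl g b) := by
  intro l
  induction l with
  | nil => intro a b h _; exact h
  | cons x xs ih =>
    intro a b h hstep
    exact ih (f a x) (g b x) (hstep a b x (by simp) h)
      (fun a b c hc hr => hstep a b c (by simp [hc]) hr)

lemma pvG_pyRange {N x : Int} (hx0 : 0 ≤ x) (hx : x < N) :
    pvG (PySem.List.pyRange 0 N 1) x = x := by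
  have hlen : (PySem.List.pyRange 0 N 1).length = N.toNat := by
    simpa using PySem.List.length_pyRange_one 0 N
  rw [pvG, PySem.List.pyGetD_eq_getElem _ _ hx0 (by rw [hlen]; omega),
      PySem.List.getElem_pyRange_one]
  omega

lemma pvG_replicate {n : Nat} {x : Int} (v : Int) (hx0 : 0 ≤ x) (hx : x < (n : Int)) :
    pvG (List.replicate n v) x = v := by
  rw [pvG, PySem.List.pyGetD_eq_getElem _ _ hx0 (by simpa using hx)]
  exact List.getElem_replicate _

lemma pvInv_init (N : Int) (hN : 0 ≤ N) :
    pvInv N.toNat (PySem.List.pyRange 0 N 1) (List.replicate N.toNat (1 : Int))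
      (PySem.List.pyRange 0 N 1) := by
  have hlen : (PySem.List.pyRange 0 N 1).length = N.toNat := by
    simpa using PySem.List.length_pyRange_one 0 N
  have hcast : ((N.toNat : Nat) : Int) = N := by omega
  have hgfix : ∀ x : Int, 0 ≤ x → x < (N.toNat : Int) → pvG (PySem.List.pyRange 0 N 1) x = x :=
    fun x h0 h1 => pvG_pyRange h0 (by omega)
  have hg : pvGood N.toNat (PySem.List.pyRange 0 N 1) := by
    refine ⟨hlen, fun x h0 h1 => ?_, fun x h0 h1 => ⟨0, ?_⟩⟩
    · rw [hgfix x h0 h1]; exact ⟨h0, h1⟩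
    · simpa [pvIter] using hgfix x h0 h1
  have hrho : ∀ x : Int, 0 ≤ x → x < (N.toNat : Int) → pvRho (PySem.List.pyRange 0 N 1) x = x :=
    fun x h0 h1 => pvRho_fix (hgfix x h0 h1)
  have hmem : ∀ x : Int, 0 ≤ x → x < (N.toNat : Int) → x ∈ PySem.List.pyRange 0 N 1 := by
    intro x h0 h1
    rw [PySem.List.mem_pyRange_one]
    omega
  have hcount : ∀ x : Int, 0 ≤ x → x < (N.toNat : Int) →
      List.count x (PySem.List.pyRange 0 N 1) = 1 := by
    intro x h0 h1
    exact List.count_eq_one_of_mem (PySem.List.nodup_pyRange_one 0 N) (hmem x h0 h1)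
  refine ⟨hg, by simp, hlen, ?_, ?_, ?_⟩
  · intro x y hx0 hx hy0 hy
    rw [hrho x hx0 hx, hrho y hy0 hy, hgfix x hx0 hx, hgfix y hy0 hy]
  · intro x hx0 hx
    rw [hrho x hx0 hx, hgfix x hx0 hx, pvG_replicate 1 hx0 hx, hcount x hx0 hx]
    simp
  · intro x hx0 hx
    rw [hrho x hx0 hx]

lemma pvGroups_fold {n : Nat} (pstar : List Int) :
    ∀ (l : List Int) (p : List Int) (acc : PySem.Set Int), pvGood n p →
      (∀ y : Int, 0 ≤ y → y < (n : Int) → pvRho p y = pvRho pstar y) →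
      (∀ i ∈ l, 0 ≤ i ∧ i < (n : Int)) →
      (l.foldl (fun acc i =>
        let pr := pvFind acc.1.length acc.1 i
        (pr.1, PySem.Set.add acc.2 pr.2)) (p, acc)).2 =
      l.foldl (fun a i => PySem.Set.add a (pvRho pstar i)) acc := by
  intro l
  induction l with
  | nil => intro p acc _ _ _; rfl
  | cons x xs ih =>
    intro p acc hg hpres hmem
    obtain ⟨hx0, hxn⟩ := hmem x (by simp)
    have hh := hg.2.2 x hx0 hxn
    have hlen : p.length = n := hg.1
    obtain ⟨hv, hg1, hpres1⟩ := pvFind_spec p.length p x hg hx0 hxn hh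
      (by have := pvDep_lt hg hx0 hxn hh; omega)
    simp only [List.foldl_cons]
    rw [show (pvFind p.length p x).2 = pvRho pstar x from by rw [hv, hpres x hx0 hxn]]
    exact ih (pvFind p.length p x).1 _ hg1
      (fun y h0 h1 => (hpres1 y h0 h1).trans (hpres y h0 h1))
      (fun i hi => hmem i (by simp [hi]))

lemma pvDedup_len_eq (f g : Int → Int) :
    ∀ (xs : List Int), (∀ a ∈ xs, ∀ b ∈ xs, (f a = f b ↔ g a = g b)) →
      (PySem.Set.ofList (xs.map f)).length = (PySem.Set.ofList (xs.map g)).length := by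
  have hcard : ∀ (h : Int → Int) (xs : List Int),
      (PySem.Set.ofList (xs.map h)).length = (xs.map h).toFinset.card := by
    intro h xs
    rw [← List.toFinset_card_of_nodup (PySem.Set.nodup_ofList _)]
    congr 1
    apply Finset.ext
    intro v
    simp [List.mem_toFinset, PySem.Set.mem_ofList]
  intro xs hiff
  rw [hcard f xs, hcard g xs]
  induction xs with
  | nil => simp
  | cons x tl ih =>
    simp only [List.map_cons, List.toFinset_cons]
    have hmx : f x ∈ (tl.map f).toFinset ↔ g x ∈ (tl.map g).toFinset := by
      simp only [List.mem_toFinset, List.mem_map]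
      constructor
      · rintro ⟨a, ha, hfa⟩
        exact ⟨a, ha, ((hiff a (by simp [ha]) x (by simp)).mp hfa)⟩
      · rintro ⟨a, ha, hga⟩
        exact ⟨a, ha, ((hiff a (by simp [ha]) x (by simp)).mpr hga)⟩
    have ihtl := ih (fun a ha b hb => hiff a (by simp [ha]) b (by simp [hb]))
    by_cases hin : f x ∈ (tl.map f).toFinset
    · rw [Finset.insert_eq_self.mpr hin, Finset.insert_eq_self.mpr (hmx.mp hin), ihtl]
    · rw [Finset.card_insert_of_notMem hin,
          Finset.card_insert_of_notMem (fun h => hin (hmx.mpr h)), ihtl]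

lemma pvMax_isSome_cons : ∀ (tl : List Int) (x : Int),
    ∃ m, PySem.List.max? (x :: tl) (fun v => v) = some m := by
  intro tl
  induction tl with
  | nil => intro x; exact ⟨x, by simp [PySem.List.max?]⟩
  | cons y tl ih =>
    intro x
    have hstep : PySem.List.max? (x :: y :: tl) (fun v => v) =
        PySem.List.max? ((if x < y then y else x) :: tl) (fun v => v) := by
      simp only [PySem.List.max?, List.foldl_cons]
      split_ifs <;> rfl
    rw [hstep]
    exact ih _

lemma pvMax_isSome : ∀ (xs : List Int), xs ≠ [] →
    ∃ m, PySem.List.max? xs (fun v => v) = some m := by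
  intro xs hne
  cases xs with
  | nil => exact absurd rfl hne
  | cons x tl => exact pvMax_isSome_cons tl x

lemma pvMax_eq {xs ys : List Int} (hx : xs ≠ []) (hy : ys ≠ [])
    (h1 : ∀ v ∈ xs, ∃ w ∈ ys, v ≤ w) (h2 : ∀ w ∈ ys, ∃ v ∈ xs, w ≤ v) :
    (PySem.List.max? xs (fun v => v)).getD 0 = (PySem.List.max? ys (fun v => v)).getD 0 := by
  obtain ⟨mx, hmx⟩ := pvMax_isSome xs hx
  obtain ⟨my, hmy⟩ := pvMax_isSome ys hy
  rw [hmx, hmy]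
  simp only [Option.getD_some]
  have hmemx := PySem.List.max?_mem hmx
  have hmemy := PySem.List.max?_mem hmy
  have hmaxx := PySem.List.max?_isMax hmx
  have hmaxy := PySem.List.max?_isMax hmy
  obtain ⟨w, hw, hle1⟩ := h1 mx hmemx
  obtain ⟨v, hv, hle2⟩ := h2 my hmemy
  have := hmaxy w hw
  have := hmaxx v hv
  omega

lemma pvList_eq_map_range (lb : List Int) (N : Int) (hN : 0 ≤ N) (hlen : lb.length = N.toNat) :
    lb = (PySem.List.pyRange 0 N 1).map (fun i => pvG lb i) := by
  have hrlen : (PySem.List.pyRange 0 N 1).length = N.toNat := by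
    simpa using PySem.List.length_pyRange_one 0 N
  apply List.ext_getElem
  · simp [hrlen, hlen]
  · intro k h1 h2
    simp only [List.getElem_map]
    rw [PySem.List.getElem_pyRange_one _ _ _ (by omega)]
    have hk : k < N.toNat := by omega
    rw [show (0 : Int) + (k : Int) = ((k : Nat) : Int) by omega, pvG,
        PySem.List.pyGetD_natCast]
    simp [List.getD, hlen, hk]

lemma pvMem_iff_pg {s : List Int} {v : Int} :
    v ∈ s ↔ ∃ x : Int, 0 ≤ x ∧ x < (s.length : Int) ∧ pvG s x = v := by
  constructor
  · intro hv
    obtain ⟨k, hk, hget⟩ := List.mem_iff_getElem.mp hv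
    refine ⟨(k : Int), by omega, by omega, ?_⟩
    rw [pvG, PySem.List.pyGetD_natCast]
    simp [List.getD, hk, hget]
  · rintro ⟨x, h0, h1, hget⟩
    rw [pvG, PySem.List.pyGetD_eq_getElem _ _ h0 h1] at hget
    rw [← hget]
    exact List.getElem_mem _

theorem solve_eq (N : Int) (lines : List (Int × Int × Int × Int))
    (hN1 : 1 ≤ N) : solve N lines = solve_alt N lines := by
  have hN0 : 0 ≤ N := by omega
  set n := N.toNat with hn
  have hNn : ((n : Nat) : Int) = N := by omega
  -- run the paired fold
  have h0 : pvInv n (PySem.List.pyRange 0 N 1, List.replicate N.toNat (1 : Int)).1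
      (PySem.List.pyRange 0 N 1, List.replicate N.toNat (1 : Int)).2
      (PySem.List.pyRange 0 N 1) := pvInv_init N hN0
  have hfold := pvFoldl_rel (fun st lb => pvInv n st.1 st.2 lb)
    (fun st i =>
      (PySem.List.pyRange (i + 1) N 1).foldl (fun st j =>
          if pvCheck (PySem.List.pyGetD lines i pvLine0) (PySem.List.pyGetD lines j pvLine0)
          then pvUnion st.1 st.2 i j else st) st)
    (fun lb i =>
      (PySem.List.pyRange (i + 1) N 1).foldl (fun lb j =>
          if PySem.List.pyGetD lb i 0 ≠ PySem.List.pyGetD lb j 0 ∧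
             pvCheck (PySem.List.pyGetD lines i pvLine0) (PySem.List.pyGetD lines j pvLine0) = true
          then lb.map (fun v => if v = PySem.List.pyGetD lb j 0 then PySem.List.pyGetD lb i 0 else v)
          else lb) lb)
    (PySem.List.pyRange 0 N 1)
    (PySem.List.pyRange 0 N 1, List.replicate N.toNat (1 : Int))
    (PySem.List.pyRange 0 N 1) h0 (by
      intro st lb i hi hR
      obtain ⟨hi0, hiN⟩ := PySem.List.mem_pyRange_one.mp hi
      apply pvFoldl_rel (fun st lb => pvInv n st.1 st.2 lb) _ _ _ st lb hR
      intro st' lb' j hj hR'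
      obtain ⟨hj1, hjN⟩ := PySem.List.mem_pyRange_one.mp hj
      obtain ⟨p', s'⟩ := st'
      exact pvStep hR' hi0 (by omega) (by omega) (by omega)
        (pvCheck (PySem.List.pyGetD lines i pvLine0) (PySem.List.pyGetD lines j pvLine0)))
  -- name the final states
  set stF := (PySem.List.pyRange 0 N 1).foldl (fun st i =>
      (PySem.List.pyRange (i + 1) N 1).foldl (fun st j =>
          if pvCheck (PySem.List.pyGetD lines i pvLine0) (PySem.List.pyGetD lines j pvLine0)
          then pvUnion st.1 st.2 i j else st) st)
      (PySem.List.pyRange 0 N 1, List.replicate N.toNat (1 : Int)) with hstF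
  set lbF := (PySem.List.pyRange 0 N 1).foldl (fun lb i =>
      (PySem.List.pyRange (i + 1) N 1).foldl (fun lb j =>
          if PySem.List.pyGetD lb i 0 ≠ PySem.List.pyGetD lb j 0 ∧
             pvCheck (PySem.List.pyGetD lines i pvLine0) (PySem.List.pyGetD lines j pvLine0) = true
          then lb.map (fun v => if v = PySem.List.pyGetD lb j 0 then PySem.List.pyGetD lb i 0 else v)
          else lb) lb)
      (PySem.List.pyRange 0 N 1) with hlbF
  obtain ⟨hg, hs, hlb, heq, hsz, hstale⟩ := hfold
  show (_, _) = (_, _)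
  have hfst : PySem.Set.len (((PySem.List.pyRange 0 N 1).foldl (fun acc i =>
      let pr := pvFind acc.1.length acc.1 i
      (pr.1, PySem.Set.add acc.2 pr.2)) (stF.1, (PySem.Set.empty : PySem.Set Int))).2) =
      PySem.Set.len (PySem.Set.ofList lbF) := by
    rw [pvGroups_fold stF.1 (PySem.List.pyRange 0 N 1) stF.1 PySem.Set.empty hg
        (fun y _ _ => rfl)
        (fun i hi => by
          obtain ⟨h1, h2⟩ := PySem.List.mem_pyRange_one.mp hi
          exact ⟨h1, by omega⟩)]
    have hA : (PySem.List.pyRange 0 N 1).foldl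
        (fun a i => PySem.Set.add a (pvRho stF.1 i)) PySem.Set.empty =
        PySem.Set.ofList ((PySem.List.pyRange 0 N 1).map (fun i => pvRho stF.1 i)) := by
      rw [PySem.Set.ofList_eq_foldl, List.foldl_map]
      rfl
    have hB : (PySem.Set.ofList lbF) =
        PySem.Set.ofList ((PySem.List.pyRange 0 N 1).map (fun i => pvG lbF i)) := by
      conv_lhs => rw [pvList_eq_map_range lbF N hN0 hlb]
    rw [hA, hB, PySem.Set.len_eq, PySem.Set.len_eq]
    congr 1
    apply pvDedup_len_eq
    intro a ha b hb
    obtain ⟨ha0, haN⟩ := PySem.List.mem_pyRange_one.mp ha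
    obtain ⟨hb0, hbN⟩ := PySem.List.mem_pyRange_one.mp hb
    exact (heq a b ha0 (by omega) hb0 (by omega)).symm
  have hsnd : (PySem.List.max? stF.2 (fun v => v)).getD 0 =
      (PySem.List.max? (lbF.map (fun v => (PySem.List.count lbF v : Int))) (fun v => v)).getD 0 := by
    have hslen : stF.2.length = n := hs
    have hlblen : lbF.length = n := hlb
    have hnpos : 0 < n := by omega
    apply pvMax_eq
    · intro h
      rw [h] at hslen
      simp at hslen
      omega
    · intro h
      rw [List.map_eq_nil_iff] at h
      rw [h] at hlblen
      simp at hlblen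
      omega
    · intro v hv
      obtain ⟨x, hx0, hxl, hgx⟩ := pvMem_iff_pg.mp hv
      rw [hslen] at hxl
      refine ⟨(List.count (pvG lbF x) lbF : Int), ?_, ?_⟩
      · rw [List.mem_map]
        refine ⟨pvG lbF x, ?_, by rw [PySem.List.count_eq]⟩
        exact pvMem_iff_pg.mpr ⟨x, hx0, by rw [hlblen]; exact hxl, rfl⟩
      · rw [← hgx, ← hsz x hx0 hxl]
        exact hstale x hx0 hxl
    · intro w hw
      rw [List.mem_map] at hw
      obtain ⟨u, hu, hwu⟩ := hw
      obtain ⟨x, hx0, hxl, hgx⟩ := pvMem_iff_pg.mp hu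
      rw [hlblen] at hxl
      obtain ⟨_, hr0, hrn⟩ := pvRho_spec hg hx0 hxl
      refine ⟨pvG stF.2 (pvRho stF.1 x), ?_, ?_⟩
      · exact pvMem_iff_pg.mpr ⟨pvRho stF.1 x, hr0, by rw [hslen]; exact hrn, rfl⟩
      · rw [hsz x hx0 hxl, ← hwu, hgx, PySem.List.count_eq]
  rw [hfst, hsnd]

-- ===== VERDICT (by name: the statement is the Claim_ definition above) =====
theorem solve_spec : Claim_equal_solve := by
  intro N lines _ hpre
  unfold Spec_solve
  exact solve_eq N lines hpre.1
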